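-- pv_equiv track=rewrite | github.com/pypi-data/pypi-mirror-398 | packages/playbooks/playbooks-0.7.3.tar.gz/playbooks-0.7.3/src/playbooks/execution/incremental_code_buffer.py | _find_last_non_whitespace_line
-- ===== SOURCE A (Python) =====
-- from typing import Optional
--
-- def _find_last_non_whitespace_line(lines: list) -> Optional[int]:
--     """Find the index of the last line that doesn't start with whitespace.
--
--     This is used to identify where a block might be complete. When an indented
--     block is followed by a line with lower indentation, that indicates the
--     block is complete.
--
--     Args:
--         lines: List of code lines
--
--     Returns:
--         Index of the last non-whitespace-starting line, or None if all lines
--         start with whitespace (or are empty)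
--     """
--     for i in range(len(lines) - 1, -1, -1):
--         line = lines[i]
--         # Skip empty lines
--         if not line.strip():
--             continue
--         # Check if line starts with whitespace
--         if line and line[0] not in (" ", "\t"):
--             return i
--
--     return None
-- ===== SOURCE B (Python) =====
-- from typing import Optional
--
--
-- def _find_last_non_whitespace_line(lines: list) -> Optional[int]:
--     """Forward single pass: overwrite the result whenever a non-empty line
--     starting without whitespace is seen; the last overwrite wins."""
--     result = None
--     for i, line in enumerate(lines):
--         if line.strip() and line[0] not in (" ", "\t"):
--             result = i
--     return result
-- ===== Notes on version B (the rewrite author's own statement) =====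
-- stated objective: alternative
-- what changed: Backward index scan with early return replaced by a forward enumerate pass that keeps the last matching index by overwriting an accumulator.
import Mathlib
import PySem

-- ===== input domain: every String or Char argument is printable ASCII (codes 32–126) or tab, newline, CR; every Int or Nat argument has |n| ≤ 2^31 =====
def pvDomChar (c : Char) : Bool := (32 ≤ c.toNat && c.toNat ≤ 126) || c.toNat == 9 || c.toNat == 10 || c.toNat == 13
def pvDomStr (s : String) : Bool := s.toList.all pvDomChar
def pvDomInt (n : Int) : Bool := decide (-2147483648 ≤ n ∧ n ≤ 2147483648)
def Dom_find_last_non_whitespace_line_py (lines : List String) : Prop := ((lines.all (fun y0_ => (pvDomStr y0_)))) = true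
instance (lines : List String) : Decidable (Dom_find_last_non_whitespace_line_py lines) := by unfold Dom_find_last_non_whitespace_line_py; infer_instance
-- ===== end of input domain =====

-- B replaces A's backward index scan (early return) by a forward enumerate pass that
-- overwrites an accumulator, keeping the last matching index; same cost, different traversal.


-- ===== PORT A =====
-- the loop 'for i in range(len(lines)-1, -1, -1)'; lines[i] via pyGetD (the loop index is
-- always in range, so Python's lines[i] never raises and equals pyGetD lines i "")
def findLoopA (lines : List String) : List Int → Option Int
  | [] => none                                   -- loop finished: return None
  | i :: rest =>
    let line := PySem.List.pyGetD lines i ""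
    if PySem.Str.strip line = "" then findLoopA lines rest          -- skip empty lines
    else if line ≠ "" ∧ PySem.Str.pyGet? line 0 ≠ some ' ' ∧ PySem.Str.pyGet? line 0 ≠ some '\t'
      then some i                                                    -- return i
      else findLoopA lines rest

def find_last_non_whitespace_line_py (lines : List String) : Option Int :=
  findLoopA lines (PySem.List.pyRange (PySem.List.len lines - 1) (-1) (-1))

-- ===== PORT B =====
def find_last_non_whitespace_line_py_alt (lines : List String) : Option Int :=
  (PySem.List.enumerate lines 0).foldl
    (fun result p =>
      if PySem.Str.strip p.2 ≠ "" ∧ PySem.Str.pyGet? p.2 0 ≠ some ' ' ∧ PySem.Str.pyGet? p.2 0 ≠ some '\t'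
      then some p.1 else result)
    none

-- ===== PRECONDITION & SPEC =====
def Spec_find_last_non_whitespace_line_py (lines : List String) (out : Option Int) : Prop := out = find_last_non_whitespace_line_py_alt lines
instance (lines : List String) (out : Option Int) : Decidable (Spec_find_last_non_whitespace_line_py lines out) := by unfold Spec_find_last_non_whitespace_line_py; infer_instance

-- ===== CLAIM (what is proved, stated in full; the proofs are below) =====
def Claim_equal_find_last_non_whitespace_line_py : Prop := ∀ (lines : List String), Dom_find_last_non_whitespace_line_py lines → Spec_find_last_non_whitespace_line_py lines (find_last_non_whitespace_line_py lines)

-- ===== LEMMAS AND PROOFS =====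

-- appending a line does not change the A-loop on indices inside the old list
lemma findLoopA_append (xs : List String) (y : String) (l : List Int)
    (h : ∀ i ∈ l, 0 ≤ i ∧ i < (xs.length : Int)) :
    findLoopA (xs ++ [y]) l = findLoopA xs l := by
  induction l with
  | nil => rfl
  | cons i rest ih =>
    have hi := h i (List.mem_cons_self ..)
    have hget : PySem.List.pyGetD (xs ++ [y]) i "" = PySem.List.pyGetD xs i "" := by
      rw [PySem.List.pyGetD_eq_getElem _ _ hi.1 (by simp; omega),
          PySem.List.pyGetD_eq_getElem _ _ hi.1 (by exact_mod_cast hi.2)]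
      rw [List.getElem_append_left (by omega)]
    simp only [findLoopA, hget]
    rw [ih (fun j hj => h j (List.mem_cons_of_mem _ hj))]

-- B's fold on xs ++ [y]: one last step on (xs.length, y) over B's value on xs
lemma altB_append (xs : List String) (y : String) :
    find_last_non_whitespace_line_py_alt (xs ++ [y]) =
      if PySem.Str.strip y ≠ "" ∧ PySem.Str.pyGet? y 0 ≠ some ' ' ∧ PySem.Str.pyGet? y 0 ≠ some '\t'
      then some (xs.length : Int) else find_last_non_whitespace_line_py_alt xs := by
  unfold find_last_non_whitespace_line_py_alt
  rw [PySem.List.enumerate_append, List.foldl_append]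
  simp [PySem.List.enumerate]

-- a string with a non-empty strip is non-empty
lemma ne_empty_of_strip_ne (s : String) (h : PySem.Str.strip s ≠ "") : s ≠ "" := by
  intro he; subst he; exact h rfl

theorem find_last_non_whitespace_line_py_spec' (lines : List String) :
    find_last_non_whitespace_line_py lines = find_last_non_whitespace_line_py_alt lines := by
  induction lines using List.reverseRecOn with
  | nil =>
    unfold find_last_non_whitespace_line_py find_last_non_whitespace_line_py_alt
    rw [PySem.List.pyRange_neg_one_eq_nil (by norm_num [PySem.List.len_eq])]
    rfl
  | append_singleton xs y ih =>
    rw [altB_append]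
    unfold find_last_non_whitespace_line_py
    have hlen : PySem.List.len (xs ++ [y]) - 1 = (xs.length : Int) := by
      simp [PySem.List.len_eq]
    rw [hlen, PySem.List.pyRange_neg_one_cons (by omega)]
    have hget : PySem.List.pyGetD (xs ++ [y]) (xs.length : Int) "" = y := by
      rw [PySem.List.pyGetD_eq_getElem _ _ (by omega) (by simp)]
      simp
    have hrest : findLoopA (xs ++ [y]) (PySem.List.pyRange ((xs.length : Int) - 1) (-1) (-1)) =
        find_last_non_whitespace_line_py xs := by
      unfold find_last_non_whitespace_line_py
      rw [PySem.List.len_eq]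
      exact findLoopA_append xs y _ (fun i hi => by
        have := (PySem.List.mem_pyRange_neg_one).1 hi; omega)
    simp only [findLoopA]
    rw [hget, hrest]
    by_cases hs : PySem.Str.strip y = ""
    · rw [if_pos hs, if_neg (by tauto), ih]
    · have hy := ne_empty_of_strip_ne y hs
      rw [if_neg hs]
      by_cases hc : PySem.Str.pyGet? y 0 ≠ some ' ' ∧ PySem.Str.pyGet? y 0 ≠ some '\t'
      · rw [if_pos ⟨hy, hc⟩, if_pos ⟨hs, hc⟩]
      · rw [if_neg (by tauto), if_neg (by tauto), ih]

-- ===== VERDICT (by name: the statement is the Claim_ definition above) =====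
theorem find_last_non_whitespace_line_py_spec : Claim_equal_find_last_non_whitespace_line_py := by
  intro lines _
  exact find_last_non_whitespace_line_py_spec' lines
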